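-- pv_equiv track=rewrite | github.com/jdiez17/pastepm | pastepm/utils.py | encode_id
-- ===== SOURCE A (Python) =====
-- BASE = 24
--
-- def encode_id(num):
--     def encode_digit(d):
--         if d < 10:
--             return chr(ord('0') + d)
--         else:
--             return chr(ord('a') + d - 10)
--
--     (d, m) = divmod(num, BASE)
--     if d:
--         return encode_id(d) + encode_digit(m)
--     else:
--         return encode_digit(m)
-- ===== SOURCE B (Python) =====
-- BASE = 24
--
-- def encode_id(num):
--     def encode_digit(d):
--         if d < 10:
--             return chr(ord('0') + d)
--         else:
--             return chr(ord('a') + d - 10)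
--
--     if num == 0:
--         return '0'
--     digits = []
--     while num:
--         (num, m) = divmod(num, BASE)
--         digits.append(encode_digit(m))
--     return ''.join(reversed(digits))
-- ===== Notes on version B (the rewrite author's own statement) =====
-- stated objective: alternative
-- what changed: Replaces the recursion over the quotient with an explicit while loop that accumulates digits least-significant-first and reverses them at the end, with the empty-loop case handled separately.
import Mathlib
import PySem

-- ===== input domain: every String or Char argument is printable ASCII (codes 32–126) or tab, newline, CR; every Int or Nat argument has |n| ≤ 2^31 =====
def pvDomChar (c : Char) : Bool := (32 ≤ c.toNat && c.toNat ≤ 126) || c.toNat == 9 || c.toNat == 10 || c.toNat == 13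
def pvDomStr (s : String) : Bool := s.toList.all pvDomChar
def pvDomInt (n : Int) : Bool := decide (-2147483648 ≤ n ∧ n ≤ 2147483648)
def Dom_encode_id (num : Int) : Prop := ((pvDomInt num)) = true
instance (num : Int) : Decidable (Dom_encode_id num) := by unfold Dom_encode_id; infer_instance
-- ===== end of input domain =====

-- B replaces A's recursion over the quotient with an explicit loop that collects digits
-- least-significant-first and reverses them (objective: alternative decomposition).
-- Pre_ excludes negative inputs, on which Python A raises RecursionError (and B loops).

-- ===== PORT A =====
-- encode_digit: chr(ord('0') + d) / chr(ord('a') + d - 10)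
def pvEncodeDigit (d : Int) : String :=
  if d < 10 then String.ofList [Char.ofNat (48 + d).toNat]
  else String.ofList [Char.ofNat (97 + d - 10).toNat]

-- A's recursion, made total with fuel (the fuel only bounds depth; on every input of
-- Pre_ it is never exhausted, so this is A's recursion step for step)
def pvEncodeIdFuel : Nat → Int → String
  | 0, num => pvEncodeDigit (PySem.Int.mod num 24)
  | f + 1, num =>
    let d := PySem.Int.floordiv num 24
    let m := PySem.Int.mod num 24
    if d ≠ 0 then pvEncodeIdFuel f d ++ pvEncodeDigit m else pvEncodeDigit m

def encode_id (num : Int) : String := pvEncodeIdFuel num.toNat num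

-- ===== PORT B =====
-- B's while loop: digits.append(encode_digit(m)) while num ≠ 0 (fuel for totality only)
def pvLoopB : Nat → Int → List String → List String
  | 0, _, digits => digits
  | f + 1, num, digits =>
    if num ≠ 0 then
      pvLoopB f (PySem.Int.floordiv num 24)
        (digits ++ [pvEncodeDigit (PySem.Int.mod num 24)])
    else digits

def encode_id_alt (num : Int) : String :=
  if num = 0 then "0"
  else String.join (pvLoopB (num.toNat + 1) num []).reverse

-- ===== PRECONDITION & SPEC =====
-- Pre_ excludes num < 0: there Python A recurses forever on the negative quotient and
-- raises RecursionError (returns no value).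
def Pre_encode_id (num : Int) : Prop := 0 ≤ num
instance (num : Int) : Decidable (Pre_encode_id num) := by unfold Pre_encode_id; infer_instance

def pvWitness_encode_id : Int := (25)

def Spec_encode_id (num : Int) (out : String) : Prop := out = encode_id_alt num
instance (num : Int) (out : String) : Decidable (Spec_encode_id num out) := by unfold Spec_encode_id; infer_instance

-- ===== CLAIM (what is proved, stated in full; the proofs are below) =====
def Claim_equal_encode_id : Prop := ∀ (num : Int), Dom_encode_id num → Pre_encode_id num → Spec_encode_id num (encode_id num)

-- ===== LEMMAS AND PROOFS =====

-- digit strings of n, least significant first (proof-side reference only)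
def pvDigits (n : Nat) : List String :=
  if n = 0 then [] else pvEncodeDigit ((n % 24 : Nat) : Int) :: pvDigits (n / 24)
decreasing_by exact Nat.div_lt_self (Nat.pos_of_ne_zero (by assumption)) (by norm_num)

theorem pvDigits_pos {n : Nat} (h : n ≠ 0) :
    pvDigits n = pvEncodeDigit ((n % 24 : Nat) : Int) :: pvDigits (n / 24) := by
  rw [pvDigits]; simp [h]

-- A's fuelled recursion computes the joined reversed digit list, given enough fuel
theorem pvA_spec : ∀ (f n : Nat), n ≤ f → n ≠ 0 →
    pvEncodeIdFuel f (n : Int) = String.join (pvDigits n).reverse := by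
  intro f
  induction f with
  | zero => intro n hf hn; omega
  | succ f ih =>
    intro n hf hn
    have hlt : n / 24 < n := Nat.div_lt_self (Nat.pos_of_ne_zero hn) (by norm_num)
    have hf : PySem.Int.floordiv (n : Int) 24 = ((n / 24 : Nat) : Int) := by
      exact_mod_cast PySem.Int.floordiv_natCast n 24
    have hm : PySem.Int.mod (n : Int) 24 = ((n % 24 : Nat) : Int) := by
      exact_mod_cast PySem.Int.mod_natCast n 24
    rw [pvEncodeIdFuel]
    simp only [hf, hm]
    rw [pvDigits_pos hn]
    by_cases hd : n / 24 = 0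
    · simp [hd, pvDigits, String.join]
    · have hd' : ((n / 24 : Nat) : Int) ≠ 0 := by exact_mod_cast hd
      simp only [hd', ne_eq, not_false_eq_true, if_true]
      rw [ih (n / 24) (by omega) hd]
      simp [String.join]

-- B's loop appends the digit list to the accumulator, given enough fuel
theorem pvB_spec : ∀ (f n : Nat) (acc : List String), n ≤ f →
    pvLoopB (f + 1) (n : Int) acc = acc ++ pvDigits n := by
  intro f
  induction f with
  | zero =>
    intro n acc hf
    interval_cases n
    simp [pvLoopB, pvDigits]
  | succ f ih =>
    intro n acc hf
    by_cases hn : n = 0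
    · subst hn; simp [pvLoopB, pvDigits]
    · have hn' : (n : Int) ≠ 0 := by exact_mod_cast hn
      have hf : PySem.Int.floordiv (n : Int) 24 = ((n / 24 : Nat) : Int) := by
        exact_mod_cast PySem.Int.floordiv_natCast n 24
      have hm : PySem.Int.mod (n : Int) 24 = ((n % 24 : Nat) : Int) := by
        exact_mod_cast PySem.Int.mod_natCast n 24
      rw [pvLoopB]
      simp only [hn', ne_eq, not_false_eq_true, if_true, hf, hm]
      have hlt : n / 24 < n := Nat.div_lt_self (Nat.pos_of_ne_zero hn) (by norm_num)
      rw [ih (n / 24) _ (by omega), pvDigits_pos hn]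
      simp

-- ===== VERDICT (by name: the statement is the Claim_ definition above) =====
theorem encode_id_spec : Claim_equal_encode_id := by
  intro num _ hpre
  unfold Pre_encode_id at hpre
  unfold Spec_encode_id encode_id encode_id_alt
  obtain ⟨n, rfl⟩ : ∃ n : Nat, num = (n : Int) := ⟨num.toNat, by omega⟩
  by_cases hn : n = 0
  · subst hn; decide
  · have hn' : (n : Int) ≠ 0 := by exact_mod_cast hn
    simp only [hn', Int.toNat_natCast]
    rw [pvA_spec n n le_rfl hn, pvB_spec n n [] le_rfl]
    simp
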